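-- pv_equiv track=rewrite | github.com/namolert/comp-security | activity-1/hacking-password.py | possible_word
-- ===== SOURCE A (Python) =====
-- def possible_word(word, full_word, i, len_word, lst):
--     if i == len_word:
--         lst.append(word)
--         return lst
--     if full_word[i] == 'o':
--         lst = possible_word(word + '0', full_word, i+1, len_word, lst)
--     if full_word[i] == 'l':
--         lst = possible_word(word + '1', full_word, i+1, len_word, lst)
--     if full_word[i] == 'i':
--         lst = possible_word(word + '1', full_word, i+1, len_word, lst)
--     lst = possible_word(
--         word + full_word[i].lower(), full_word, i+1, len_word, lst)
--     lst = possible_word(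
--         word + full_word[i].upper(), full_word, i+1, len_word, lst)
--     return lst
-- ===== SOURCE B (Python) =====
-- import itertools
--
--
-- def possible_word(word, full_word, i, len_word, lst):
--     choices = []
--     for j in range(i, len_word):
--         c = full_word[j]
--         opts = []
--         if c == 'o':
--             opts.append('0')
--         if c == 'l':
--             opts.append('1')
--         if c == 'i':
--             opts.append('1')
--         opts.append(c.lower())
--         opts.append(c.upper())
--         choices.append(opts)
--     for combo in itertools.product(*choices):
--         lst.append(word + ''.join(combo))
--     return lst
-- ===== Notes on version B (the rewrite author's own statement) =====
-- stated objective: alternative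
-- what changed: Replaces A's five-branch recursion with an iterative build of one per-character option list followed by itertools.product, appending each combination to lst in the same order.
import Mathlib
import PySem

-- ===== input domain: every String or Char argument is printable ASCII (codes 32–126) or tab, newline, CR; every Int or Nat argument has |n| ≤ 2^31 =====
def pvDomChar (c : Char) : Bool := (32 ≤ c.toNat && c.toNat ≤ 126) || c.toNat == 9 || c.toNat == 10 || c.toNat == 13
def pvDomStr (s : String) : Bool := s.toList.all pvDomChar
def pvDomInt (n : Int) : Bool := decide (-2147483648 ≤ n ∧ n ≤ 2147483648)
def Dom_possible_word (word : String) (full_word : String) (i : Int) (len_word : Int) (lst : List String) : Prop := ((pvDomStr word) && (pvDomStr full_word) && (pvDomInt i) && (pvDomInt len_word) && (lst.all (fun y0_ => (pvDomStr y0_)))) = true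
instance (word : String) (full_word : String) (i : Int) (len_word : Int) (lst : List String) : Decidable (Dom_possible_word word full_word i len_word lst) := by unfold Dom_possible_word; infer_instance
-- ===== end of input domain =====

-- B replaces A's five-way recursive branching by building one per-character option list and taking
-- its cartesian product (itertools.product), appending each combination to lst — same values, same
-- order, same in-place appends to lst; objective: alternative decomposition.

-- ===== PORT A =====
-- Literal port of A's recursion, made total with a fuel counter (len_word - i).toNat, which in
-- Python is exactly the remaining recursion depth.  Where the Python raises IndexError —
-- full_word[i] out of range, or i > len_word so the recursion can never reach the base case and
-- must eventually run off the string — the port returns [] (excluded by Pre_possible_word).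
def pwAGo (full_word : String) (len_word : Int) : Nat → String → Int → List String → List String
  | fuel, word, i, lst =>
    if i = len_word then lst ++ [word]
    else
      match fuel with
      | 0 => []
      | fuel + 1 =>
        match PySem.Str.pyGet? full_word i with
        | none => []
        | some c =>
          let lst1 := if c = 'o' then pwAGo full_word len_word fuel (word ++ "0") (i+1) lst else lst
          let lst2 := if c = 'l' then pwAGo full_word len_word fuel (word ++ "1") (i+1) lst1 else lst1
          let lst3 := if c = 'i' then pwAGo full_word len_word fuel (word ++ "1") (i+1) lst2 else lst2
          let lst4 := pwAGo full_word len_word fuel (word ++ String.ofList [PySem.Chars.lowerChar c]) (i+1) lst3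
          pwAGo full_word len_word fuel (word ++ String.ofList [PySem.Chars.upperChar c]) (i+1) lst4

def possible_word (word : String) (full_word : String) (i : Int) (len_word : Int) (lst : List String) : List String :=
  pwAGo full_word len_word (len_word - i).toNat word i lst

-- ===== PORT B =====
-- the per-character option list 'opts' of Source B
def pwOpts (c : Char) : List String :=
  let opts : List String := []
  let opts := if c = 'o' then opts ++ ["0"] else opts
  let opts := if c = 'l' then opts ++ ["1"] else opts
  let opts := if c = 'i' then opts ++ ["1"] else opts
  let opts := opts ++ [String.ofList [PySem.Chars.lowerChar c]]
  opts ++ [String.ofList [PySem.Chars.upperChar c]]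

-- the 'choices' loop of Source B; none marks the IndexError Source B raises on an out-of-range index
def pwChoices (full_word : String) (i len_word : Int) : Option (List (List String)) :=
  (PySem.List.pyRange i len_word).foldl
    (fun acc j =>
      match acc, PySem.Str.pyGet? full_word j with
      | some cs, some c => some (cs ++ [pwOpts c])
      | _, _ => none)
    (some [])

-- itertools.product(*choices): rightmost factor varies fastest
def pwProduct : List (List String) → List (List String)
  | [] => [[]]
  | opts :: rest => opts.flatMap (fun o => (pwProduct rest).map (fun combo => o :: combo))

def possible_word_alt (word : String) (full_word : String) (i : Int) (len_word : Int) (lst : List String) : List String :=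
  match pwChoices full_word i len_word with
  | none => []
  | some choices => lst ++ (pwProduct choices).map (fun combo => word ++ combo.foldl (· ++ ·) "")

-- ===== PRECONDITION & SPEC =====
-- Pre_ is exactly the set of inputs on which the Python A returns (elsewhere it raises IndexError):
-- either i = len_word (immediate base case), or i < len_word and every index of [i, len_word) is a
-- valid (possibly negative) index into full_word.
def Pre_possible_word (_word : String) (full_word : String) (i : Int) (len_word : Int) (_lst : List String) : Prop :=
  i ≤ len_word ∧ (i < len_word → -(PySem.Str.len full_word) ≤ i ∧ len_word ≤ PySem.Str.len full_word)
instance (word : String) (full_word : String) (i : Int) (len_word : Int) (lst : List String) : Decidable (Pre_possible_word word full_word i len_word lst) := by unfold Pre_possible_word; infer_instance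

def pvWitness_possible_word : String × String × Int × Int × List String := ("pw", "oki", 0, 3, ["seed"])

def Spec_possible_word (word : String) (full_word : String) (i : Int) (len_word : Int) (lst : List String) (out : List String) : Prop := out = possible_word_alt word full_word i len_word lst
instance (word : String) (full_word : String) (i : Int) (len_word : Int) (lst : List String) (out : List String) : Decidable (Spec_possible_word word full_word i len_word lst out) := by unfold Spec_possible_word; infer_instance

-- ===== CLAIM (what is proved, stated in full; the proofs are below) =====
def Claim_equal_possible_word : Prop := ∀ (word : String) (full_word : String) (i : Int) (len_word : Int) (lst : List String), Dom_possible_word word full_word i len_word lst → Pre_possible_word word full_word i len_word lst → Spec_possible_word word full_word i len_word lst (possible_word word full_word i len_word lst)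

-- ===== LEMMAS AND PROOFS =====

theorem pw_foldl_append_str (l : List String) (a b : String) :
    l.foldl (· ++ ·) (a ++ b) = a ++ l.foldl (· ++ ·) b := by
  induction l generalizing b with
  | nil => rfl
  | cons x l ih => simpa [List.foldl, String.append_assoc] using ih (b ++ x)

theorem pw_pyGet?_some (s : String) (i : Int)
    (h1 : -(PySem.Str.len s) ≤ i) (h2 : i < PySem.Str.len s) :
    ∃ c, PySem.Str.pyGet? s i = some c := by
  cases h : PySem.Str.pyGet? s i with
  | some c => exact ⟨c, rfl⟩
  | none =>
    exfalso
    rw [PySem.Str.pyGet?_eq] at h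
    simp only [PySem.Chars.pyGet?_eq_listPyGet?] at h
    rw [PySem.List.pyGet?_eq_none_iff] at h
    apply h
    simp only [PySem.Raise.InRange, PySem.Str.len_eq, String.length_toList] at *
    constructor <;> omega

-- the fold function of pwChoices
def pwF (full_word : String) : Option (List (List String)) → Int → Option (List (List String)) :=
  fun acc j =>
    match acc, PySem.Str.pyGet? full_word j with
    | some cs, some c => some (cs ++ [pwOpts c])
    | _, _ => none

theorem pwChoices_eq_foldl (full_word : String) (i len_word : Int) :
    pwChoices full_word i len_word = (PySem.List.pyRange i len_word).foldl (pwF full_word) (some []) := rfl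

theorem pwF_foldl_none (full_word : String) (js : List Int) :
    js.foldl (pwF full_word) none = none := by
  induction js with
  | nil => rfl
  | cons j js ih => simpa [List.foldl, pwF] using ih

theorem pwF_foldl_shift (full_word : String) (js : List Int) (cs : List (List String)) :
    js.foldl (pwF full_word) (some cs)
      = Option.map (cs ++ ·) (js.foldl (pwF full_word) (some [])) := by
  induction js generalizing cs with
  | nil => simp
  | cons j js ih =>
    cases h : PySem.Str.pyGet? full_word j with
    | none =>
      simp only [List.foldl_cons, pwF, h]
      simp [pwF_foldl_none]
    | some c =>
      simp only [List.foldl_cons, pwF, h]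
      rw [ih (cs ++ [pwOpts c]), ih ([] ++ [pwOpts c])]
      cases js.foldl (pwF full_word) (some []) <;> simp

theorem pwChoices_base (full_word : String) (i len_word : Int) (h : len_word ≤ i) :
    pwChoices full_word i len_word = some [] := by
  rw [pwChoices_eq_foldl]
  rw [PySem.List.pyRange_one_eq_nil h]
  rfl

theorem pwChoices_cons (full_word : String) (i len_word : Int) (c : Char)
    (hlt : i < len_word) (hc : PySem.Str.pyGet? full_word i = some c) :
    pwChoices full_word i len_word
      = Option.map (pwOpts c :: ·) (pwChoices full_word (i+1) len_word) := by
  rw [pwChoices_eq_foldl, pwChoices_eq_foldl, PySem.List.pyRange_one_cons hlt]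
  simp only [List.foldl, pwF, hc]
  rw [pwF_foldl_shift]
  cases (PySem.List.pyRange (i+1) len_word).foldl (pwF full_word) (some []) <;> simp

theorem pwChoices_isSome (full_word : String) (len_word : Int) :
    ∀ (n : Nat) (i : Int), (len_word - i).toNat = n → i ≤ len_word →
    (i < len_word → -(PySem.Str.len full_word) ≤ i ∧ len_word ≤ PySem.Str.len full_word) →
    ∃ cs, pwChoices full_word i len_word = some cs := by
  intro n
  induction n with
  | zero =>
    intro i hn hle _
    exact ⟨[], pwChoices_base full_word i len_word (by omega)⟩
  | succ n ih =>
    intro i hn hle hb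
    have hlt : i < len_word := by omega
    obtain ⟨h1, h2⟩ := hb hlt
    obtain ⟨c, hc⟩ := pw_pyGet?_some full_word i h1 (by omega)
    obtain ⟨cs, hcs⟩ := ih (i+1) (by omega) (by omega)
      (fun h => ⟨by omega, h2⟩)
    exact ⟨pwOpts c :: cs, by rw [pwChoices_cons full_word i len_word c hlt hc, hcs]; rfl⟩

-- B satisfies A's recurrence: one character step = a foldl of recursive calls over its option list
theorem pw_alt_step (word full_word : String) (i len_word : Int) (lst : List String) (c : Char)
    (rest : List (List String))
    (hlt : i < len_word) (hc : PySem.Str.pyGet? full_word i = some c)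
    (hrest : pwChoices full_word (i+1) len_word = some rest) :
    possible_word_alt word full_word i len_word lst
      = (pwOpts c).foldl (fun acc o => possible_word_alt (word ++ o) full_word (i+1) len_word acc) lst := by
  have hch : pwChoices full_word i len_word = some (pwOpts c :: rest) := by
    rw [pwChoices_cons full_word i len_word c hlt hc, hrest]; rfl
  have hjoin : ∀ (o : String) (cb : List String),
      word ++ (o :: cb).foldl (· ++ ·) "" = (word ++ o) ++ cb.foldl (· ++ ·) "" := by
    intro o cb
    have h0 : (o : String) = o ++ "" := by simp
    calc word ++ (o :: cb).foldl (· ++ ·) ""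
        = word ++ cb.foldl (· ++ ·) ("" ++ o) := rfl
      _ = word ++ cb.foldl (· ++ ·) (o ++ "") := by simp
      _ = word ++ (o ++ cb.foldl (· ++ ·) "") := by rw [pw_foldl_append_str]
      _ = (word ++ o) ++ cb.foldl (· ++ ·) "" := by rw [String.append_assoc]
  have hf : (fun (acc : List String) (o : String) =>
        acc ++ (pwProduct rest).map (fun cb => (word ++ o) ++ cb.foldl (· ++ ·) ""))
      = (fun acc o => possible_word_alt (word ++ o) full_word (i+1) len_word acc) := by
    funext acc o
    simp [possible_word_alt, hrest]
  calc possible_word_alt word full_word i len_word lst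
      = lst ++ (pwProduct (pwOpts c :: rest)).map (fun cb => word ++ cb.foldl (· ++ ·) "") := by
        simp [possible_word_alt, hch]
    _ = lst ++ ((pwOpts c).flatMap
          (fun o => (pwProduct rest).map (fun cb => (word ++ o) ++ cb.foldl (· ++ ·) ""))) := by
        simp only [pwProduct, List.map_flatMap, List.map_map]
        congr 1
        apply List.flatMap_congr
        intro o _
        apply List.map_congr_left
        intro cb _
        exact hjoin o cb
    _ = (pwOpts c).foldl (fun acc o =>
          acc ++ (pwProduct rest).map (fun cb => (word ++ o) ++ cb.foldl (· ++ ·) "")) lst := by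
        exact (PySem.List.foldl_append_eq_flatMap _ _ _).symm
    _ = (pwOpts c).foldl (fun acc o => possible_word_alt (word ++ o) full_word (i+1) len_word acc) lst := by
        rw [hf]

theorem pw_main (full_word : String) (len_word : Int) :
    ∀ (n : Nat) (i : Int) (word : String) (lst : List String),
    (len_word - i).toNat = n → i ≤ len_word →
    (i < len_word → -(PySem.Str.len full_word) ≤ i ∧ len_word ≤ PySem.Str.len full_word) →
    pwAGo full_word len_word n word i lst = possible_word_alt word full_word i len_word lst := by
  intro n
  induction n with
  | zero =>
    intro i word lst hn hle _
    have hi : i = len_word := by omega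
    subst hi
    simp [pwAGo, possible_word_alt, pwChoices_base full_word i i le_rfl, pwProduct]
  | succ n ih =>
    intro i word lst hn hle hb
    have hlt : i < len_word := by omega
    have hne : ¬ (i = len_word) := by omega
    obtain ⟨h1, h2⟩ := hb hlt
    obtain ⟨c, hc⟩ := pw_pyGet?_some full_word i h1 (by omega)
    obtain ⟨rest, hrest⟩ := pwChoices_isSome full_word len_word n (i+1) (by omega) (by omega)
      (fun h => ⟨by omega, h2⟩)
    have ihx : ∀ (w : String) (l : List String),
        pwAGo full_word len_word n w (i+1) l = possible_word_alt w full_word (i+1) len_word l := by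
      intro w l
      exact ih (i+1) w l (by omega) (by omega) (fun h => ⟨by omega, h2⟩)
    rw [pw_alt_step word full_word i len_word lst c rest hlt hc hrest]
    rw [pwAGo]
    simp only [hne, if_false, hc]
    by_cases ho : c = 'o' <;> by_cases hl : c = 'l' <;> by_cases hi2 : c = 'i' <;>
      simp [pwOpts, ho, hl, hi2, List.foldl, ihx]

-- ===== VERDICT (by name: the statement is the Claim_ definition above) =====
theorem possible_word_spec : Claim_equal_possible_word := by
  intro word full_word i len_word lst _ hpre
  unfold Spec_possible_word
  show pwAGo full_word len_word (len_word - i).toNat word i lst = _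
  exact pw_main full_word len_word (len_word - i).toNat i word lst rfl hpre.1 hpre.2
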